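-- pv_equiv track=rewrite | github.com/blockdoyle/wordle-helper | wordle.py | MakeFiveCharWordlist
-- ===== SOURCE A (Python) =====
-- def CheckNonRepeating(word):
--     holder = []
--     for char in word:
--         if char in holder:
--             return False,"Word has repeating characters."
--             break
--         else:
--             holder.append(char)
--     return True
--
-- def MakeFiveCharWordlist(words):
--     holder = []
--     for word in words:
--         if len(word) == 5:
--             if CheckNonRepeating(word) == True:
--                 holder.append(word)
--             else:
--                 pass
--     return holder
-- ===== SOURCE B (Python) =====
-- def MakeFiveCharWordlist(words):
--     holder = []
--     for word in words:
--         if len(word) == 5: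
--             cs = sorted(word)
--             if all(a != b for a, b in zip(cs, cs[1:])):
--                 holder.append(word)
--     return holder
-- ===== Notes on version B (the rewrite author's own statement) =====
-- stated objective: alternative
-- what changed: Replaces the seen-list membership helper (early-exit char-by-char scan against an accumulated list) by sorting each word's characters and checking that no two adjacent sorted characters are equal; correct because a sorted sequence has a repeat iff some adjacent pair is equal.
import Mathlib
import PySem

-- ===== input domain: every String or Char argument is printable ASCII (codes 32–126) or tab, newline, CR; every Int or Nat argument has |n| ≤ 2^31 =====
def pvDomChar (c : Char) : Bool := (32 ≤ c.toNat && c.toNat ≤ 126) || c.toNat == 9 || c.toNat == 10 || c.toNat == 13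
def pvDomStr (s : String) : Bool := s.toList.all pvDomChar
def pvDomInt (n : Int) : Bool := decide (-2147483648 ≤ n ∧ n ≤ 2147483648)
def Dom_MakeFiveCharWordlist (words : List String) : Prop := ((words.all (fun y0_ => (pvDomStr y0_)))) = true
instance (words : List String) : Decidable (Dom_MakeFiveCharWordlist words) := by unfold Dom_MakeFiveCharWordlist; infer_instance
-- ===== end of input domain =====

-- B sorts each word's characters and checks adjacent pairs for equality instead of A's seen-list membership scan; objective: alternative (return value only, no mutation).


-- ===== PORT A =====
-- CheckNonRepeating's loop: in Python it returns (False, "…") on a repeat — which compares ≠ True —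
-- and True otherwise, so the caller's '== True' test is exactly this Bool.
def pvCheckNonRepeating : List Char → List Char → Bool
  | [], _ => true
  | c :: cs, holder => if holder.contains c then false else pvCheckNonRepeating cs (holder ++ [c])

def MakeFiveCharWordlist (words : List String) : List String :=
  words.foldl (fun holder word =>
    if PySem.Str.len word = 5 then
      if pvCheckNonRepeating word.toList [] = true then holder ++ [word] else holder
    else holder) []

-- ===== PORT B =====
-- all(a != b for a, b in zip(cs, cs[1:])): cs[1:] on a list with a nonnegative start is drop 1 (exact)
def pvAdjDistinct (cs : List Char) : Bool :=
  (cs.zip (cs.drop 1)).all (fun p => !(p.1 == p.2))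

def MakeFiveCharWordlist_alt (words : List String) : List String :=
  words.foldl (fun holder word =>
    if PySem.Str.len word = 5 then
      let cs := PySem.List.sorted word.toList (fun x => x) false
      if pvAdjDistinct cs then holder ++ [word] else holder
    else holder) []

-- ===== PRECONDITION & SPEC =====
def Spec_MakeFiveCharWordlist (words : List String) (out : List String) : Prop := out = MakeFiveCharWordlist_alt words
instance (words : List String) (out : List String) : Decidable (Spec_MakeFiveCharWordlist words out) := by unfold Spec_MakeFiveCharWordlist; infer_instance

-- ===== CLAIM (what is proved, stated in full; the proofs are below) =====
def Claim_equal_MakeFiveCharWordlist : Prop := ∀ (words : List String), Dom_MakeFiveCharWordlist words → Spec_MakeFiveCharWordlist words (MakeFiveCharWordlist words)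

-- ===== LEMMAS AND PROOFS =====

-- A's seen-list loop succeeds exactly on duplicate-free suffixes (holder kept duplicate-free).
theorem pvCheck_iff_nodup (l : List Char) (holder : List Char) (h : holder.Nodup) :
    pvCheckNonRepeating l holder = true ↔ (holder ++ l).Nodup := by
  induction l generalizing holder with
  | nil => simp [pvCheckNonRepeating, h]
  | cons c cs ih =>
    simp only [pvCheckNonRepeating]
    by_cases hc : c ∈ holder
    · have : holder.contains c = true := by simpa using hc
      rw [this]
      simp only [if_true]
      constructor
      · intro hfalse; cases hfalse
      · intro hn
        exfalso
        rw [List.nodup_append] at hn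
        exact hn.2.2 c hc c List.mem_cons_self rfl
    · have hcf : holder.contains c = false := by simpa using hc
      rw [hcf]
      simp only [Bool.false_eq_true, if_false]
      have h' : (holder ++ [c]).Nodup := by
        rw [List.nodup_append]
        refine ⟨h, List.nodup_singleton c, ?_⟩
        intro a ha b hb hEq
        apply hc
        rw [List.mem_singleton] at hb
        rwa [hEq, hb] at ha
      rw [ih (holder ++ [c]) h']
      simp
  
-- on a ≤-sorted list, all adjacent pairs distinct ↔ no duplicates at all
theorem pvAdj_iff_nodup (cs : List Char) (hs : cs.Pairwise (· ≤ ·)) :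
    pvAdjDistinct cs = true ↔ cs.Nodup := by
  induction cs with
  | nil => simp [pvAdjDistinct]
  | cons a t ih =>
    cases t with
    | nil => simp [pvAdjDistinct]
    | cons b t' =>
      have hp := List.pairwise_cons.mp hs
      have hp' := List.pairwise_cons.mp hp.2
      have hab : a ≤ b := hp.1 b (by simp)
      have ihr := ih hp.2
      simp only [pvAdjDistinct, List.drop_one, List.tail_cons, List.zip_cons_cons,
        List.all_cons, Bool.and_eq_true, Bool.not_eq_true', beq_eq_false_iff_ne] at ihr ⊢
      constructor
      · rintro ⟨hne, hrest⟩
        have hnb : (b :: t').Nodup := ihr.mp hrest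
        refine List.nodup_cons.mpr ⟨?_, hnb⟩
        intro hmem
        rcases List.mem_cons.mp hmem with rfl | hmt
        · exact hne rfl
        · have hlt : a < b := lt_of_le_of_ne hab hne
          have : b ≤ a := hp'.1 a hmt
          exact absurd (lt_of_lt_of_le hlt this) (lt_irrefl a)
      · intro hn
        have hn' := List.nodup_cons.mp hn
        refine ⟨fun hEq => hn'.1 (hEq ▸ List.mem_cons_self), ihr.mpr hn'.2⟩

-- per-word: A's non-repeating test equals B's sorted-adjacent test
theorem pvCond_iff (w : String) :
    pvCheckNonRepeating w.toList [] = true ↔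
      pvAdjDistinct (PySem.List.sorted w.toList (fun x => x) false) = true := by
  have hperm : (PySem.List.sorted w.toList (fun x => x) false).Perm w.toList :=
    PySem.List.sorted_perm _ _ _
  have hpw : (PySem.List.sorted w.toList (fun x => x) false).Pairwise (· ≤ ·) := by
    simpa using PySem.List.sorted_pairwise w.toList (fun x => x)
  rw [pvCheck_iff_nodup _ [] (by simp), pvAdj_iff_nodup _ hpw, List.nil_append,
    hperm.nodup_iff]

theorem pvLoop_eq (ws : List String) (acc : List String) :
    ws.foldl (fun holder word =>
      if PySem.Str.len word = 5 then
        if pvCheckNonRepeating word.toList [] = true then holder ++ [word] else holder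
      else holder) acc
    = ws.foldl (fun holder word =>
      if PySem.Str.len word = 5 then
        let cs := PySem.List.sorted word.toList (fun x => x) false
        if pvAdjDistinct cs then holder ++ [word] else holder
      else holder) acc := by
  induction ws generalizing acc with
  | nil => rfl
  | cons w ws ih =>
    simp only [List.foldl_cons]
    rw [show (if PySem.Str.len w = 5 then
        if pvCheckNonRepeating w.toList [] = true then acc ++ [w] else acc
      else acc) = (if PySem.Str.len w = 5 then
        let cs := PySem.List.sorted w.toList (fun x => x) false
        if pvAdjDistinct cs then acc ++ [w] else acc
      else acc) from by
      by_cases h5 : PySem.Str.len w = 5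
      · simp only [h5, if_true]
        by_cases hc : pvCheckNonRepeating w.toList [] = true
        · rw [if_pos hc, if_pos ((pvCond_iff w).mp hc)]
        · rw [if_neg hc, if_neg (fun hb => hc ((pvCond_iff w).mpr hb))]
      · rw [if_neg h5, if_neg h5]]
    exact ih _

-- ===== VERDICT (by name: the statement is the Claim_ definition above) =====
theorem MakeFiveCharWordlist_spec : Claim_equal_MakeFiveCharWordlist := by
  intro words _
  unfold Spec_MakeFiveCharWordlist MakeFiveCharWordlist MakeFiveCharWordlist_alt
  exact pvLoop_eq words []
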